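-- pv_equiv track=rewrite | github.com/Exist-Liang/tbrgs-streamlit | algorithm.py | cus1
-- ===== SOURCE A (Python) =====
-- import heapq
--
-- def cus1(edges, origin, destinations):
--     heap = []
--     heapq.heappush(heap, (0, 0, origin, [origin]))
--     visited = {}
--     count = 0
--     sequence = 1
--     best_path = None
--     goal_node = None
--
--     while heap:
--         cost, _, current, path = heapq.heappop(heap)
--         count += 1
--
--         if current in destinations:
--             if goal_node is None or cost < visited.get(goal_node, float('inf')):
--                 goal_node = current
--                 best_path = path
--             continue
--
--         for neighbor, edge_cost in sorted(edges.get(current, []), key=lambda x: (x[0], x[1])):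
--             new_cost = cost + edge_cost
--             if neighbor not in visited or new_cost < visited[neighbor]:
--                 visited[neighbor] = new_cost
--                 heapq.heappush(heap, (new_cost, sequence, neighbor, path + [neighbor]))
--                 sequence += 1
--
--     return goal_node, count, best_path
-- ===== SOURCE B (Python) =====
-- def _insort(a, item):
--     # insert item into the ascending list a, keeping it ascending
--     i = 0
--     while i < len(a) and a[i] < item:
--         i += 1
--     a.insert(i, item)
--
--
-- def cus1(edges, origin, destinations):
--     # Same uniform-cost search order (pop order, pop count and tie-breaking are
--     # observable outputs), but realised with different data structures: the
--     # frontier is a plain ascending list popped from the front (ordered agenda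
--     # instead of a binary heap), and instead of copying the whole path on every
--     # push, each push is recorded in a push log (seq -> (node, parent seq));
--     # the winning path is rebuilt once from the log at the end.
--     agenda = [(0, 0, origin)]        # ascending (cost, seq, node); seq unique
--     parent = {0: (origin, None)}     # push log: seq -> (node, parent seq)
--     visited = {}
--     count = 0
--     seq = 1
--     goal = None
--     best = None                      # seq of the best goal entry
--     while agenda:
--         cost, s, node = agenda.pop(0)
--         count += 1
--         if node in destinations:
--             if goal is None or cost < visited.get(goal, float('inf')):
--                 goal = node
--                 best = s
--             continue
--         for nb, w in sorted(edges.get(node, []), key=lambda x: (x[0], x[1])):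
--             nc = cost + w
--             if nb not in visited or nc < visited[nb]:
--                 visited[nb] = nc
--                 _insort(agenda, (nc, seq, nb))
--                 parent[seq] = (nb, s)
--                 seq += 1
--     if best is None:
--         return goal, count, None
--     path = []
--     while best is not None:
--         node, best = parent[best]
--         path.append(node)
--     path.reverse()
--     return goal, count, path
-- ===== Notes on version B (the rewrite author's own statement) =====
-- stated objective: alternative
-- what changed: The binary heap of (cost, seq, node, copied-path) tuples is replaced by a plain ascending agenda list popped from the front with linear insertion, and the per-push O(path) list copy is replaced by a push log (seq -> (node, parent seq)) from which the winning path is rebuilt once at the end; pop order, pop count and tie-breaking are observable outputs, so the search order itself is part of the specification and is preserved.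
import Mathlib
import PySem

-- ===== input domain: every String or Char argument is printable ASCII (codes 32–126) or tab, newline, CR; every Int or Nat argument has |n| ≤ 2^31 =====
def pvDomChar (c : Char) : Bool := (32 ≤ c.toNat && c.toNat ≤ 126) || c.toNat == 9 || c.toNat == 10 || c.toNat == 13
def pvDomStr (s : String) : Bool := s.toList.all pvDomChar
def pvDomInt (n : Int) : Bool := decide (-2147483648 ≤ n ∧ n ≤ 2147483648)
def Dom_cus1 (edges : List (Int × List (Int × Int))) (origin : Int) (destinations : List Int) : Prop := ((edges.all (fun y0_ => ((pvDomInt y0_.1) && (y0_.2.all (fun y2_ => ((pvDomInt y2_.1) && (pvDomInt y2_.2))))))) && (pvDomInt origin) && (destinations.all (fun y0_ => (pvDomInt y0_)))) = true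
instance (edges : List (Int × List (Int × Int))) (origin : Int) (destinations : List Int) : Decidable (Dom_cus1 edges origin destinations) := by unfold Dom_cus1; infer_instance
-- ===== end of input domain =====

-- B keeps the observable search order (pop order, pop count, tie-breaking are outputs) but uses
-- different data structures: the frontier is a plain ascending list popped from the front instead
-- of a binary heap, and instead of copying the whole path on every push it records each push in a
-- log (seq -> (node, parent seq)) and rebuilds the winning path once at the end.  Both loop ports
-- carry a fuel counter: it is ONLY a totality guard for Lean (Python's `while` can diverge on
-- graphs with a reachable negative-total cycle); both ports use the same fuel expression, so the
-- equivalence below is unconditional.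

-- fuel guard: (number of adjacency entries + 1) * (4 * sum of |edge cost| + 8) + 8
def pvFuel (edges : List (Int × List (Int × Int))) : Nat :=
  let steps := edges.flatMap (fun kl => kl.2)
  (steps.length + 1) * (4 * (steps.map (fun s => s.2.natAbs)).sum + 8) + 8

-- ===== PORT A =====
-- heapq.heappop on entries (cost, sequence, node, path): all sequence numbers in the heap are
-- distinct, so the pop is exactly "remove the unique entry minimal in (cost, sequence)" (the
-- comparison never reaches the payload).
def pvHeapPop (e : Int × Int × Int × List Int) :
    List (Int × Int × Int × List Int) →
    (Int × Int × Int × List Int) × List (Int × Int × Int × List Int)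
  | [] => (e, [])
  | f :: t =>
    if f.1 < e.1 ∨ (f.1 = e.1 ∧ f.2.1 < e.2.1) then
      let p := pvHeapPop f t; (p.1, e :: p.2)
    else
      let p := pvHeapPop e t; (p.1, f :: p.2)

-- body of A's `for neighbor, edge_cost in sorted(...)` loop; accumulator (visited, heap, sequence)
def pvStepA (cost : Int) (path : List Int)
    (acc : PySem.Dict Int Int × List (Int × Int × Int × List Int) × Int) (s : Int × Int) :
    PySem.Dict Int Int × List (Int × Int × Int × List Int) × Int :=
  let newc := cost + s.2
  let push : Bool := match acc.1.get? s.1 with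
    | none => true
    | some v => decide (newc < v)
  if push then
    (acc.1.insert s.1 newc, acc.2.1 ++ [(newc, acc.2.2, s.1, path ++ [s.1])], acc.2.2 + 1)
  else acc

-- A's `while heap:` loop
def pvLoopA (edges : List (Int × List (Int × Int))) (dests : List Int) (fuel : Nat)
    (heap : List (Int × Int × Int × List Int)) (vis : PySem.Dict Int Int)
    (count seqn : Int) (goal : Option Int) (best : Option (List Int)) :
    Option Int × Int × Option (List Int) :=
  match heap with
  | [] => (goal, count, best)
  | e :: t =>
    match fuel with
    | 0 => (goal, count, best)      -- fuel guard only; see header comment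
    | fuel' + 1 =>
      let pr := pvHeapPop e t
      let cost := pr.1.1
      let cur := pr.1.2.2.1
      let path := pr.1.2.2.2
      let count' := count + 1
      if dests.contains cur then
        let upd : Bool := match goal with
          | none => true
          | some g => match vis.get? g with
            | none => true          -- visited.get(goal_node, float('inf')): cost < inf
            | some v => decide (cost < v)
        pvLoopA edges dests fuel' pr.2 vis count' seqn
          (if upd then some cur else goal) (if upd then some path else best)
      else
        -- sorted(edges.get(current, []), key=lambda x: (x[0], x[1]))
        let ns := PySem.List.sorted2 ((PySem.Dict.mk edges).getD cur [])
          (fun x => x.1) (fun x => x.2)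
        let st := ns.foldl (pvStepA cost path) (vis, pr.2, seqn)
        pvLoopA edges dests fuel' st.2.1 st.1 count' st.2.2 goal best

def cus1 (edges : List (Int × List (Int × Int))) (origin : Int) (destinations : List Int) :
    Option Int × Int × Option (List Int) :=
  pvLoopA edges destinations (pvFuel edges) [(0, 0, origin, [origin])] PySem.Dict.empty 0 1 none none

-- ===== PORT B =====
-- B's helper `_insort(a, item)`: linear scan to the first index whose entry is not < item,
-- then insert there (Python tuple `<` on (Int, Int, Int) is the full lexicographic order).
def pvTupLt (x y : Int × Int × Int) : Bool :=
  decide (x.1 < y.1 ∨ (x.1 = y.1 ∧ (x.2.1 < y.2.1 ∨ (x.2.1 = y.2.1 ∧ x.2.2 < y.2.2))))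

def pvInsort (a : List (Int × Int × Int)) (item : Int × Int × Int) : List (Int × Int × Int) :=
  match a with
  | [] => [item]
  | x :: r => if pvTupLt x item then x :: pvInsort r item else item :: x :: r

-- B's final `while best is not None: node, best = parent[best]; path.append(node)` walk;
-- fuel is a totality guard only (the loop invariant proved below makes it sufficient)
def pvChainF (parent : PySem.Dict Int (Int × Option Int)) : Option Int → Nat → Option (List Int)
  | none, _ => some []
  | some _, 0 => none
  | some s, f + 1 =>
    match parent.get? s with
    | none => none
    | some (n, ps) => (pvChainF parent ps f).map (n :: ·)

-- body of B's `for nb, w in sorted(...)` loop; accumulator (visited, agenda, parent, seq);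
-- s is the seq of the popped entry
def pvStepB (cost : Int) (s : Int)
    (acc : PySem.Dict Int Int × List (Int × Int × Int) × PySem.Dict Int (Int × Option Int) × Int)
    (nb : Int × Int) :
    PySem.Dict Int Int × List (Int × Int × Int) × PySem.Dict Int (Int × Option Int) × Int :=
  let nc := cost + nb.2
  let push : Bool := match acc.1.get? nb.1 with
    | none => true
    | some v => decide (nc < v)
  if push then
    (acc.1.insert nb.1 nc, pvInsort acc.2.1 (nc, acc.2.2.2, nb.1),
     acc.2.2.1.insert acc.2.2.2 (nb.1, some s), acc.2.2.2 + 1)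
  else acc

-- B's `while agenda:` loop; pops the FRONT of the ascending agenda; returns
-- (goal, count, best seq, final seq counter, push log)
def pvLoopB (edges : List (Int × List (Int × Int))) (dests : List Int) (fuel : Nat)
    (agenda : List (Int × Int × Int)) (parent : PySem.Dict Int (Int × Option Int))
    (vis : PySem.Dict Int Int) (count seqn : Int) (goal : Option Int) (best : Option Int) :
    Option Int × Int × Option Int × Int × PySem.Dict Int (Int × Option Int) :=
  match agenda with
  | [] => (goal, count, best, seqn, parent)
  | a :: rest =>
    match fuel with
    | 0 => (goal, count, best, seqn, parent)      -- fuel guard only; see header comment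
    | fuel' + 1 =>
      let cost := a.1
      let s := a.2.1
      let node := a.2.2
      if dests.contains node then
        let upd : Bool := match goal with
          | none => true
          | some g => match vis.get? g with
            | none => true
            | some v => decide (cost < v)
        pvLoopB edges dests fuel' rest parent vis (count + 1) seqn
          (if upd then some node else goal) (if upd then some s else best)
      else
        let ns := PySem.List.sorted2 ((PySem.Dict.mk edges).getD node [])
          (fun x => x.1) (fun x => x.2)
        let st := ns.foldl (pvStepB cost s) (vis, rest, parent, seqn)
        pvLoopB edges dests fuel' st.2.1 st.2.2.1 st.1 (count + 1) st.2.2.2 goal best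

def cus1_alt (edges : List (Int × List (Int × Int))) (origin : Int) (destinations : List Int) :
    Option Int × Int × Option (List Int) :=
  let r := pvLoopB edges destinations (pvFuel edges) [(0, 0, origin)]
    (PySem.Dict.empty.insert 0 (origin, none)) PySem.Dict.empty 0 1 none none
  match r.2.2.1 with
  | none => (r.1, r.2.1, none)
  | some s =>
    match pvChainF r.2.2.2.2 (some s) r.2.2.2.1.toNat with
    | none => (r.1, r.2.1, none)    -- unreachable under the loop invariant (Python: no KeyError)
    | some l => (r.1, r.2.1, some l.reverse)

-- ===== PRECONDITION & SPEC =====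
def Spec_cus1 (edges : List (Int × List (Int × Int))) (origin : Int) (destinations : List Int) (out : Option Int × Int × Option (List Int)) : Prop := out = cus1_alt edges origin destinations
instance (edges : List (Int × List (Int × Int))) (origin : Int) (destinations : List Int) (out : Option Int × Int × Option (List Int)) : Decidable (Spec_cus1 edges origin destinations out) := by unfold Spec_cus1; infer_instance

-- ===== CLAIM (what is proved, stated in full; the proofs are below) =====
def Claim_equal_cus1 : Prop := ∀ (edges : List (Int × List (Int × Int))) (origin : Int) (destinations : List Int), Dom_cus1 edges origin destinations → Spec_cus1 edges origin destinations (cus1 edges origin destinations)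

-- ===== LEMMAS AND PROOFS =====

-- strip a heap entry of A to an agenda entry of B
def pvStrip (e : Int × Int × Int × List Int) : Int × Int × Int := (e.1, e.2.1, e.2.2.1)

-- the order heapq pops by (payload never compared: seqs distinct)
def pvLt (x y : Int × Int × Int) : Prop := x.1 < y.1 ∨ (x.1 = y.1 ∧ x.2.1 < y.2.1)

-- "l is the chain read off the push log from o, all keys < bound, keys strictly decreasing"
inductive PvChain (parent : PySem.Dict Int (Int × Option Int)) : Int → Option Int → List Int → Prop
  | nil (b : Int) : PvChain parent b none []
  | cons {b s n : Int} {ps : Option Int} {rest : List Int} :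
      0 ≤ s → s < b → parent.get? s = some (n, ps) → PvChain parent s ps rest →
      PvChain parent b (some s) (n :: rest)

lemma pvChain_mono {parent : PySem.Dict Int (Int × Option Int)} {b b' : Int} {o : Option Int}
    {l : List Int} (h : PvChain parent b o l) (hb : b ≤ b') : PvChain parent b' o l := by
  cases h with
  | nil => exact PvChain.nil b'
  | cons h0 hs hg ht => exact PvChain.cons h0 (lt_of_lt_of_le hs hb) hg ht

lemma pvChain_insert {parent : PySem.Dict Int (Int × Option Int)} {b : Int} {o : Option Int}
    {l : List Int} (h : PvChain parent b o l) {k : Int} (v : Int × Option Int) (hk : b ≤ k) :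
    PvChain (parent.insert k v) b o l := by
  induction h with
  | nil b => exact PvChain.nil b
  | @cons b1 s1 n1 ps1 rest1 h0 hs hg _ ih =>
    exact PvChain.cons h0 hs
      (by rw [PySem.Dict.get?_insert, if_neg (show s1 ≠ k by omega)]; exact hg)
      (ih (by omega))

lemma pvChain_length {parent : PySem.Dict Int (Int × Option Int)} {b : Int} {o : Option Int}
    {l : List Int} (h : PvChain parent b o l) :
    l.length ≤ (match o with | none => 0 | some s => s.toNat + 1) := by
  induction h with
  | nil => simp
  | cons h0 hs _ ht ih =>
    cases ht with
    | nil => simp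
    | @cons _ s' _ _ _ h0' hs' _ _ => simp at ih ⊢; omega

lemma pvChainF_of_chain {parent : PySem.Dict Int (Int × Option Int)} {b : Int} {o : Option Int}
    {l : List Int} (h : PvChain parent b o l) :
    ∀ f : Nat, l.length ≤ f → pvChainF parent o f = some l := by
  induction h with
  | nil => intro f _; cases f <;> rfl
  | cons h0 hs hg _ ih =>
    intro f hf
    match f with
    | f' + 1 =>
      simp only [pvChainF, hg]
      rw [ih f' (by simpa using hf)]
      rfl

-- pvHeapPop returns a permutation with a pvLt-minimal head
lemma pvHeapPop_spec : ∀ (t : List (Int × Int × Int × List Int)) (e),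
    ((pvHeapPop e t).1 :: (pvHeapPop e t).2).Perm (e :: t) ∧
    ∀ x ∈ (pvHeapPop e t).2, ¬ pvLt (pvStrip x) (pvStrip (pvHeapPop e t).1) := by
  intro t
  induction t with
  | nil => intro e; exact ⟨by simp [pvHeapPop], by simp [pvHeapPop]⟩
  | cons f t ih =>
    intro e
    simp only [pvHeapPop]
    split_ifs with h
    · obtain ⟨hperm, hmin⟩ := ih f
      refine ⟨?_, ?_⟩
      · exact (List.Perm.swap e (pvHeapPop f t).1 (pvHeapPop f t).2).trans (hperm.cons e)
      · intro x hx
        rcases List.mem_cons.1 hx with hx | hx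
        · subst hx
          have hf : f ∈ (pvHeapPop f t).1 :: (pvHeapPop f t).2 := hperm.symm.subset (by simp)
          rcases List.mem_cons.1 hf with hf | hf
          · rw [← hf]; simp only [pvLt, pvStrip]; omega
          · have := hmin f hf; simp only [pvLt, pvStrip] at this ⊢; omega
        · exact hmin x hx
    · obtain ⟨hperm, hmin⟩ := ih e
      refine ⟨?_, ?_⟩
      · exact (List.Perm.swap f (pvHeapPop e t).1 (pvHeapPop e t).2).trans
          ((hperm.cons f).trans (List.Perm.swap e f t))
      · intro x hx
        rcases List.mem_cons.1 hx with hx | hx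
        · subst hx
          have he : e ∈ (pvHeapPop e t).1 :: (pvHeapPop e t).2 := hperm.symm.subset (by simp)
          rcases List.mem_cons.1 he with he | he
          · rw [← he]; simp only [pvLt, pvStrip]; omega
          · have := hmin e he; simp only [pvLt, pvStrip] at this ⊢; omega
        · exact hmin x hx

-- the head of the sorted agenda is exactly what pvHeapPop removes
lemma pvHead_eq_pop {t : List (Int × Int × Int × List Int)} {e a rest}
    (hperm : (a :: rest).Perm ((e :: t).map pvStrip))
    (hsort : List.Pairwise pvLt (a :: rest)) :
    a = pvStrip (pvHeapPop e t).1 ∧ rest.Perm ((pvHeapPop e t).2.map pvStrip) := by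
  obtain ⟨hp, hmin⟩ := pvHeapPop_spec t e
  have hperm2 : (a :: rest).Perm
      (pvStrip (pvHeapPop e t).1 :: (pvHeapPop e t).2.map pvStrip) :=
    hperm.trans (hp.map pvStrip).symm
  by_cases hcase : a = pvStrip (pvHeapPop e t).1
  · refine ⟨hcase, ?_⟩
    have h2 := hperm2
    rw [hcase] at h2
    exact h2.cons_inv
  · exfalso
    have ha : a ∈ pvStrip (pvHeapPop e t).1 :: (pvHeapPop e t).2.map pvStrip :=
      hperm2.subset (by simp)
    have ha2 : a ∈ (pvHeapPop e t).2.map pvStrip := by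
      rcases List.mem_cons.1 ha with h | h
      · exact absurd h hcase
      · exact h
    obtain ⟨x, hx, hxa⟩ := List.mem_map.1 ha2
    have hm : pvStrip (pvHeapPop e t).1 ∈ a :: rest := hperm2.symm.subset (by simp)
    have hm2 : pvStrip (pvHeapPop e t).1 ∈ rest := by
      rcases List.mem_cons.1 hm with h | h
      · exact absurd h.symm hcase
      · exact h
    have hlt : pvLt a (pvStrip (pvHeapPop e t).1) :=
      (List.pairwise_cons.1 hsort).1 _ hm2
    exact hmin x hx (hxa ▸ hlt)

lemma pvInsort_perm : ∀ (a : List (Int × Int × Int)) (x), (pvInsort a x).Perm (x :: a) := by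
  intro a x
  induction a with
  | nil => simp [pvInsort]
  | cons y r ih =>
    simp only [pvInsort]
    split_ifs with h
    · exact (ih.cons y).trans (List.Perm.swap x y r)
    · exact List.Perm.refl _

lemma pvInsort_pairwise {a : List (Int × Int × Int)} {x} (hs : List.Pairwise pvLt a)
    (hd : ∀ y ∈ a, y.2.1 ≠ x.2.1) : List.Pairwise pvLt (pvInsort a x) := by
  induction a with
  | nil => simp [pvInsort]
  | cons y r ih =>
    obtain ⟨hy, hr⟩ := List.pairwise_cons.1 hs
    simp only [pvInsort]
    split_ifs with hlt
    · refine List.pairwise_cons.2 ⟨?_, ih hr (fun z hz => hd z (List.mem_cons_of_mem _ hz))⟩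
      intro z hz
      have hz' : z ∈ x :: r := (pvInsort_perm r x).subset hz
      rcases List.mem_cons.1 hz' with hz' | hz'
      · subst hz'
        have hdy := hd y (by simp)
        simp only [pvTupLt, decide_eq_true_eq] at hlt
        unfold pvLt; omega
      · exact hy z hz'
    · refine List.pairwise_cons.2 ⟨?_, hs⟩
      intro z hz
      rcases List.mem_cons.1 hz with hz | hz
      · subst hz
        have hdy := hd z (by simp)
        simp only [pvTupLt, decide_eq_true_eq] at hlt
        unfold pvLt; omega
      · have h1 : pvLt y z := hy z hz
        have hdy := hd y (by simp)
        simp only [pvTupLt, decide_eq_true_eq] at hlt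
        unfold pvLt at h1 ⊢; omega

-- the joint invariant of A's heap and B's (agenda, push log)
def pvInv (q : Int) (heapA : List (Int × Int × Int × List Int)) (agenda : List (Int × Int × Int))
    (parent : PySem.Dict Int (Int × Option Int)) : Prop :=
  agenda.Perm (heapA.map pvStrip) ∧ List.Pairwise pvLt agenda ∧
  (heapA.map (fun e => e.2.1)).Nodup ∧
  ∀ e ∈ heapA, 0 ≤ e.2.1 ∧ e.2.1 < q ∧ PvChain parent q (some e.2.1) e.2.2.2.reverse

-- relation between A's best path and B's best seq
def pvBestRel (parent : PySem.Dict Int (Int × Option Int)) (b : Int) :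
    Option (List Int) → Option Int → Prop
  | none, none => True
  | some p, some s => 0 ≤ s ∧ s < b ∧ PvChain parent b (some s) p.reverse
  | _, _ => False

-- the two neighbour folds stay related
lemma pvFold_rel (cost : Int) (path : List Int) (s : Int) :
    ∀ (ns : List (Int × Int)) (vis : PySem.Dict Int Int) heapA agenda parent (q : Int),
    pvInv q heapA agenda parent → 0 ≤ s → s < q → PvChain parent q (some s) path.reverse →
    (ns.foldl (pvStepB cost s) (vis, agenda, parent, q)).1
        = (ns.foldl (pvStepA cost path) (vis, heapA, q)).1 ∧
    (ns.foldl (pvStepB cost s) (vis, agenda, parent, q)).2.2.2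
        = (ns.foldl (pvStepA cost path) (vis, heapA, q)).2.2 ∧
    q ≤ (ns.foldl (pvStepA cost path) (vis, heapA, q)).2.2 ∧
    pvInv (ns.foldl (pvStepA cost path) (vis, heapA, q)).2.2
      (ns.foldl (pvStepA cost path) (vis, heapA, q)).2.1
      (ns.foldl (pvStepB cost s) (vis, agenda, parent, q)).2.1
      (ns.foldl (pvStepB cost s) (vis, agenda, parent, q)).2.2.1 ∧
    (∀ b o l, PvChain parent b o l → b ≤ q →
      PvChain (ns.foldl (pvStepB cost s) (vis, agenda, parent, q)).2.2.1 b o l) := by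
  intro ns
  induction ns with
  | nil =>
    intro vis heapA agenda parent q hInv hs0 hsq hch
    exact ⟨rfl, rfl, le_refl _, hInv, fun b o l h _ => h⟩
  | cons nb ns ih =>
    intro vis heapA agenda parent q hInv hs0 hsq hch
    simp only [List.foldl_cons]
    have hsplit : (pvStepA cost path (vis, heapA, q) nb = (vis, heapA, q) ∧
        pvStepB cost s (vis, agenda, parent, q) nb = (vis, agenda, parent, q)) ∨
        (∃ vis' : PySem.Dict Int Int,
          pvStepA cost path (vis, heapA, q) nb
            = (vis', heapA ++ [(cost + nb.2, q, nb.1, path ++ [nb.1])], q + 1) ∧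
          pvStepB cost s (vis, agenda, parent, q) nb
            = (vis', pvInsort agenda (cost + nb.2, q, nb.1), parent.insert q (nb.1, some s), q + 1)) := by
      cases hv : vis.get? nb.1 with
      | none => exact Or.inr ⟨vis.insert nb.1 (cost + nb.2), by simp [pvStepA, hv], by simp [pvStepB, hv]⟩
      | some v =>
        by_cases hc : cost + nb.2 < v
        · exact Or.inr ⟨vis.insert nb.1 (cost + nb.2), by simp [pvStepA, hv, hc], by simp [pvStepB, hv, hc]⟩
        · exact Or.inl ⟨by simp [pvStepA, hv, hc], by simp [pvStepB, hv, hc]⟩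
    rcases hsplit with ⟨hA, hB⟩ | ⟨vis', hA, hB⟩
    · rw [hA, hB]
      exact ih vis heapA agenda parent q hInv hs0 hsq hch
    · rw [hA, hB]
      obtain ⟨hperm, hsort, hnd, hent⟩ := hInv
      have hInvNew : pvInv (q + 1) (heapA ++ [(cost + nb.2, q, nb.1, path ++ [nb.1])])
          (pvInsort agenda (cost + nb.2, q, nb.1)) (parent.insert q (nb.1, some s)) := by
        refine ⟨?_, ?_, ?_, ?_⟩
        · have h3 : ((heapA ++ [(cost + nb.2, q, nb.1, path ++ [nb.1])]).map pvStrip)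
              = heapA.map pvStrip ++ [(cost + nb.2, q, nb.1)] := by simp [pvStrip]
          rw [h3]
          exact ((pvInsort_perm agenda _).trans (hperm.cons _)).trans
            (List.perm_append_singleton _ _).symm
        · apply pvInsort_pairwise hsort
          intro y hy
          have hy2 : y ∈ heapA.map pvStrip := hperm.subset hy
          obtain ⟨eA, heA, rfl⟩ := List.mem_map.1 hy2
          have := (hent eA heA).2.1
          simp only [pvStrip]
          omega
        · simp only [List.map_append, List.map_cons, List.map_nil]
          rw [List.nodup_append]
          refine ⟨hnd, by simp, ?_⟩
          intro z hz
          obtain ⟨eA, heA, rfl⟩ := List.mem_map.1 hz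
          have := (hent eA heA).2.1
          simp
          omega
        · intro e he
          rcases List.mem_append.1 he with he | he
          · obtain ⟨h0, h1, h2⟩ := hent e he
            exact ⟨h0, by omega,
              pvChain_mono (pvChain_insert h2 _ (le_refl q)) (by omega)⟩
          · simp only [List.mem_singleton] at he
            subst he
            dsimp only
            refine ⟨by omega, by omega, ?_⟩
            simp only [List.reverse_append, List.reverse_singleton, List.singleton_append]
            exact PvChain.cons (by omega) (by omega) (PySem.Dict.get?_insert_self _ _ _)
              (pvChain_insert hch _ (le_refl q))
      obtain ⟨c1, c2, c3, c4, c5⟩ := ih vis' _ _ _ (q + 1) hInvNew hs0 (by omega)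
        (pvChain_mono (pvChain_insert hch _ (le_refl q)) (by omega))
      exact ⟨c1, c2, le_trans (by omega) c3, c4,
        fun b o l h hb => c5 b o l (pvChain_insert h _ (by omega)) (by omega)⟩

-- the two main loops stay related
lemma pvLoop_rel (edges : List (Int × List (Int × Int))) (dests : List Int) :
    ∀ (fuel : Nat) heapA agenda parent (vis : PySem.Dict Int Int) (count seqn : Int)
      (goal : Option Int) (bestA : Option (List Int)) (bestB : Option Int),
    pvInv seqn heapA agenda parent → pvBestRel parent seqn bestA bestB →
    (pvLoopB edges dests fuel agenda parent vis count seqn goal bestB).1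
        = (pvLoopA edges dests fuel heapA vis count seqn goal bestA).1 ∧
    (pvLoopB edges dests fuel agenda parent vis count seqn goal bestB).2.1
        = (pvLoopA edges dests fuel heapA vis count seqn goal bestA).2.1 ∧
    pvBestRel (pvLoopB edges dests fuel agenda parent vis count seqn goal bestB).2.2.2.2
      (pvLoopB edges dests fuel agenda parent vis count seqn goal bestB).2.2.2.1
      (pvLoopA edges dests fuel heapA vis count seqn goal bestA).2.2
      (pvLoopB edges dests fuel agenda parent vis count seqn goal bestB).2.2.1 := by
  intro fuel
  induction fuel with
  | zero =>
    intro heapA agenda parent vis count seqn goal bestA bestB hInv hBest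
    cases heapA <;> cases agenda <;> exact ⟨rfl, rfl, hBest⟩
  | succ fuel ih =>
    intro heapA agenda parent vis count seqn goal bestA bestB hInv hBest
    cases heapA with
    | nil =>
      have hag : agenda = [] := by
        have := hInv.1
        simp only [List.map_nil] at this
        exact this.eq_nil
      subst hag
      exact ⟨rfl, rfl, hBest⟩
    | cons e t =>
      cases agenda with
      | nil =>
        exfalso
        have := hInv.1.symm.eq_nil
        simp at this
      | cons a rest =>
        obtain ⟨hperm, hsort, hnd, hent⟩ := hInv
        obtain ⟨ha, hrest⟩ := pvHead_eq_pop hperm hsort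
        have hpp := (pvHeapPop_spec t e).1
        have hmem : (pvHeapPop e t).1 ∈ e :: t := hpp.subset (by simp)
        obtain ⟨hm0, hmq, hmch⟩ := hent _ hmem
        have hndrest : ((pvHeapPop e t).2.map (fun x => x.2.1)).Nodup := by
          have h1 : (((pvHeapPop e t).1 :: (pvHeapPop e t).2).map (fun x => x.2.1)).Nodup :=
            ((hpp.map _).nodup_iff).2 hnd
          simp only [List.map_cons] at h1
          exact h1.of_cons
        have hInv' : pvInv seqn (pvHeapPop e t).2 rest parent :=
          ⟨hrest, (List.pairwise_cons.1 hsort).2, hndrest,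
            fun x hx => hent x (hpp.subset (List.mem_cons_of_mem _ hx))⟩
        subst ha
        rw [pvLoopA.eq_def, pvLoopB.eq_def]
        dsimp only [pvStrip]
        by_cases hd : dests.contains (pvHeapPop e t).1.2.2.1
        · simp only [hd, if_true]
          cases goal with
          | none =>
            exact ih (pvHeapPop e t).2 rest parent vis (count + 1) seqn _ _ _ hInv'
              ⟨hm0, hmq, hmch⟩
          | some g =>
            cases hg : vis.get? g with
            | none =>
              simp only [hg]
              exact ih (pvHeapPop e t).2 rest parent vis (count + 1) seqn _ _ _ hInv'
                ⟨hm0, hmq, hmch⟩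
            | some v =>
              simp only [hg]
              by_cases hc : (pvHeapPop e t).1.1 < v
              · simp only [hc, decide_true, if_true]
                exact ih (pvHeapPop e t).2 rest parent vis (count + 1) seqn _ _ _ hInv'
                  ⟨hm0, hmq, hmch⟩
              · simp only [hc, decide_false]
                exact ih (pvHeapPop e t).2 rest parent vis (count + 1) seqn _ _ _ hInv' hBest
        · simp only [hd, if_false, Bool.false_eq_true]
          obtain ⟨c1, c2, c3, c4, c5⟩ := pvFold_rel (pvHeapPop e t).1.1 (pvHeapPop e t).1.2.2.2
            (pvHeapPop e t).1.2.1
            (PySem.List.sorted2 ((PySem.Dict.mk edges).getD (pvHeapPop e t).1.2.2.1 [])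
              (fun x => x.1) (fun x => x.2))
            vis (pvHeapPop e t).2 rest parent seqn hInv' hm0 hmq hmch
          rw [c1, c2]
          have hBest' : pvBestRel
              (((PySem.List.sorted2 ((PySem.Dict.mk edges).getD (pvHeapPop e t).1.2.2.1 [])
                (fun x => x.1) (fun x => x.2)).foldl
                  (pvStepB (pvHeapPop e t).1.1 (pvHeapPop e t).1.2.1)
                  (vis, rest, parent, seqn)).2.2.1)
              (((PySem.List.sorted2 ((PySem.Dict.mk edges).getD (pvHeapPop e t).1.2.2.1 [])
                (fun x => x.1) (fun x => x.2)).foldl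
                  (pvStepA (pvHeapPop e t).1.1 (pvHeapPop e t).1.2.2.2)
                  (vis, (pvHeapPop e t).2, seqn)).2.2)
              bestA bestB := by
            cases bestA with
            | none => cases bestB with
              | none => trivial
              | some s => exact absurd hBest (by simp [pvBestRel])
            | some p => cases bestB with
              | none => exact absurd hBest (by simp [pvBestRel])
              | some s =>
                obtain ⟨b0, b1, bch⟩ := hBest
                exact ⟨b0, lt_of_lt_of_le b1 c3, pvChain_mono (c5 _ _ _ bch (le_refl seqn)) c3⟩
          exact ih _ _ _ _ (count + 1) _ goal bestA bestB c4 hBest'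

-- ===== VERDICT (by name: the statement is the Claim_ definition above) =====
theorem cus1_spec : Claim_equal_cus1 := by
  intro edges origin destinations _
  unfold Spec_cus1 cus1 cus1_alt
  have hInv : pvInv 1 [(0, 0, origin, [origin])] [(0, 0, origin)]
      (PySem.Dict.empty.insert 0 (origin, none)) := by
    refine ⟨by simp [pvStrip], by simp, by simp, ?_⟩
    intro e he
    simp only [List.mem_singleton] at he
    subst he
    refine ⟨le_refl 0, by norm_num, ?_⟩
    simp only [List.reverse_singleton]
    exact PvChain.cons (le_refl 0) (by norm_num) (PySem.Dict.get?_insert_self _ _ _) (PvChain.nil 0)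
  obtain ⟨h1, h2, h3⟩ := pvLoop_rel edges destinations (pvFuel edges)
    [(0, 0, origin, [origin])] [(0, 0, origin)] (PySem.Dict.empty.insert 0 (origin, none))
    PySem.Dict.empty 0 1 none none none hInv trivial
  rcases hA : pvLoopA edges destinations (pvFuel edges) [(0, 0, origin, [origin])]
      PySem.Dict.empty 0 1 none none with ⟨gA, cA, bA⟩
  rcases hB : pvLoopB edges destinations (pvFuel edges) [(0, 0, origin)]
      (PySem.Dict.empty.insert 0 (origin, none)) PySem.Dict.empty 0 1 none none with
    ⟨gB, cB, bB, qB, pB⟩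
  rw [hA, hB] at h1 h2 h3
  dsimp only at h1 h2 h3 ⊢
  cases bA with
  | none =>
    cases bB with
    | none => simp [h1, h2]
    | some s => exact absurd h3 (by simp [pvBestRel])
  | some p =>
    cases bB with
    | none => exact absurd h3 (by simp [pvBestRel])
    | some s =>
      obtain ⟨hs0, hsq, hch⟩ := h3
      have hlen := pvChain_length hch
      have hF : pvChainF pB (some s) qB.toNat = some p.reverse := by
        apply pvChainF_of_chain hch
        simp only at hlen
        omega
      simp [hF, h1, h2]
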